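-- pv_equiv track=rewrite | github.com/khaili73/bc_tools | compare.py | group_barcodes
-- ===== SOURCE A (Python) =====
-- from collections import Counter, namedtuple
--
-- def group_barcodes(barcodes_minimizers, s_sup, m_sup):
--     small = []
--     medium = []
--     large = []
--     group = namedtuple('group', ['small', 'medium', 'large'])
--     for bc, mins in barcodes_minimizers.items():
--         if len(mins) < s_sup:
--             small.append(bc)
--         elif len(mins) < m_sup:
--             medium.append(bc)
--         else:
--             large.append(bc)
--     return group(small, medium, large)
-- ===== SOURCE B (Python) =====
-- from collections import Counter, namedtuple
--
-- def group_barcodes(barcodes_minimizers, s_sup, m_sup):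
--     group = namedtuple('group', ['small', 'medium', 'large'])
--     return group(
--         [bc for bc, mins in barcodes_minimizers.items() if len(mins) < s_sup],
--         [bc for bc, mins in barcodes_minimizers.items() if s_sup <= len(mins) < m_sup],
--         [bc for bc, mins in barcodes_minimizers.items() if len(mins) >= s_sup and len(mins) >= m_sup],
--     )
-- ===== Notes on version B (the rewrite author's own statement) =====
-- stated objective: simpler
-- what changed: Replaces the single branching pass with three mutable accumulators by three independent filtering comprehensions over the items, one per output list.
import Mathlib
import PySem

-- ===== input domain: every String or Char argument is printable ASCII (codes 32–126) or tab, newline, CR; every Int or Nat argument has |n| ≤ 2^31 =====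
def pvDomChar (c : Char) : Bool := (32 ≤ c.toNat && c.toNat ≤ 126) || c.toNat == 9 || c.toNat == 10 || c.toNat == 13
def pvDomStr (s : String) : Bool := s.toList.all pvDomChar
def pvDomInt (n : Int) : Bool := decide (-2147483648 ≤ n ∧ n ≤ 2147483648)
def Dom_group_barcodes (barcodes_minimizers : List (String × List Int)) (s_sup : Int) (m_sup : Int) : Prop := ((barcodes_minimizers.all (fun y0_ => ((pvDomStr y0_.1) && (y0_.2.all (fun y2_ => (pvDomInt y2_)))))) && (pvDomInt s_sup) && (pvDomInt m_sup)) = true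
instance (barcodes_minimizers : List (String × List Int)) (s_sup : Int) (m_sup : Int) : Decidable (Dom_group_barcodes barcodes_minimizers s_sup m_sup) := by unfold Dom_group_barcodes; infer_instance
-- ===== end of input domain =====

-- ===== PORT A =====
def group_barcodes (barcodes_minimizers : List (String × List Int)) (s_sup : Int) (m_sup : Int) : List String × List String × List String :=
  -- one pass: for each (bc, mins), append bc to small / medium / large following A's if/elif/else
  let st := barcodes_minimizers.foldl (fun (st : List String × List String × List String) p =>
    if (p.2.length : Int) < s_sup then (st.1 ++ [p.1], st.2.1, st.2.2)
    else if (p.2.length : Int) < m_sup then (st.1, st.2.1 ++ [p.1], st.2.2)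
    else (st.1, st.2.1, st.2.2 ++ [p.1])) ([], [], [])
  st

-- ===== PORT B =====
def group_barcodes_alt (barcodes_minimizers : List (String × List Int)) (s_sup : Int) (m_sup : Int) : List String × List String × List String :=
  -- three independent filtering passes, one per group (B's comprehensions)
  ((barcodes_minimizers.filter (fun p => (p.2.length : Int) < s_sup)).map Prod.fst,
   (barcodes_minimizers.filter (fun p => s_sup ≤ (p.2.length : Int) ∧ (p.2.length : Int) < m_sup)).map Prod.fst,
   (barcodes_minimizers.filter (fun p => s_sup ≤ (p.2.length : Int) ∧ m_sup ≤ (p.2.length : Int))).map Prod.fst)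

-- ===== PRECONDITION & SPEC =====
def Spec_group_barcodes (barcodes_minimizers : List (String × List Int)) (s_sup : Int) (m_sup : Int) (out : List String × List String × List String) : Prop := out = group_barcodes_alt barcodes_minimizers s_sup m_sup
instance (barcodes_minimizers : List (String × List Int)) (s_sup : Int) (m_sup : Int) (out : List String × List String × List String) : Decidable (Spec_group_barcodes barcodes_minimizers s_sup m_sup out) := by unfold Spec_group_barcodes; infer_instance

-- ===== CLAIM (what is proved, stated in full; the proofs are below) =====
def Claim_equal_group_barcodes : Prop := ∀ (barcodes_minimizers : List (String × List Int)) (s_sup : Int) (m_sup : Int), Dom_group_barcodes barcodes_minimizers s_sup m_sup → Spec_group_barcodes barcodes_minimizers s_sup m_sup (group_barcodes barcodes_minimizers s_sup m_sup)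

-- ===== LEMMAS AND PROOFS =====

theorem gb_fold_inv (s_sup m_sup : Int) (l : List (String × List Int)) (acc : List String × List String × List String) :
    l.foldl (fun (st : List String × List String × List String) p =>
      if (p.2.length : Int) < s_sup then (st.1 ++ [p.1], st.2.1, st.2.2)
      else if (p.2.length : Int) < m_sup then (st.1, st.2.1 ++ [p.1], st.2.2)
      else (st.1, st.2.1, st.2.2 ++ [p.1])) acc
    = (acc.1 ++ (l.filter (fun p => decide ((p.2.length : Int) < s_sup))).map Prod.fst,
       acc.2.1 ++ (l.filter (fun p => decide (s_sup ≤ (p.2.length : Int) ∧ (p.2.length : Int) < m_sup))).map Prod.fst,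
       acc.2.2 ++ (l.filter (fun p => decide (s_sup ≤ (p.2.length : Int) ∧ m_sup ≤ (p.2.length : Int)))).map Prod.fst) := by
  induction l generalizing acc with
  | nil => simp
  | cons p t ih =>
    simp only [List.foldl_cons, List.filter_cons]
    by_cases h1 : (p.2.length : Int) < s_sup
    · simp [h1, ih, not_le.mpr h1]
    · by_cases h2 : (p.2.length : Int) < m_sup
      · simp [h1, h2, ih, not_lt.mp h1, not_le.mpr h2]
      · simp [h1, h2, ih, not_lt.mp h1, not_lt.mp h2]

-- ===== VERDICT (by name: the statement is the Claim_ definition above) =====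
theorem group_barcodes_spec : Claim_equal_group_barcodes := by
  intro l s m _
  unfold Spec_group_barcodes group_barcodes group_barcodes_alt
  simpa using gb_fold_inv s m l ([], [], [])
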